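-- pv_equiv track=rewrite | github.com/mnestis/advent2017 | 09/part1.py | remove_garbage
-- ===== SOURCE A (Python) =====
-- def remove_garbage(data_stream):
--
--     in_garbage = False
--     bang_count = 0
--
--     output_stream = ""
--     for char in data_stream:
--         if not in_garbage:
--             if char != "<":
--                 output_stream += char
--             else:
--                 in_garbage = True
--         else:
--             if char == "!":
--                 bang_count += 1
--             else:
--                 if bang_count % 2 == 0 and char == ">":
--                     in_garbage = False
--                 bang_count = 0
--     return output_stream
-- ===== SOURCE B (Python) =====
-- def _skip_garbage(s, i):
--     # return the index just past the garbage block that started before i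
--     n = len(s)
--     while i < n:
--         c = s[i]
--         if c == '!':
--             i += 2          # '!' cancels the following character
--         elif c == '>':
--             return i + 1
--         else:
--             i += 1
--     return i
--
-- def remove_garbage(data_stream):
--     out = []
--     i, n = 0, len(data_stream)
--     while i < n:
--         c = data_stream[i]
--         if c == '<':
--             i = _skip_garbage(data_stream, i + 1)
--         else:
--             out.append(c)
--             i += 1
--     return ''.join(out)
-- ===== Notes on version B (the rewrite author's own statement) =====
-- stated objective: idiomatic
-- what changed: Replaces the boolean flag and consecutive-bang counter with a two-level scan: a helper that skips a whole garbage block by consuming each escape character together with the character it cancels, and a main loop that collects kept characters into a list joined once instead of repeated string concatenation.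
import Mathlib
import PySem

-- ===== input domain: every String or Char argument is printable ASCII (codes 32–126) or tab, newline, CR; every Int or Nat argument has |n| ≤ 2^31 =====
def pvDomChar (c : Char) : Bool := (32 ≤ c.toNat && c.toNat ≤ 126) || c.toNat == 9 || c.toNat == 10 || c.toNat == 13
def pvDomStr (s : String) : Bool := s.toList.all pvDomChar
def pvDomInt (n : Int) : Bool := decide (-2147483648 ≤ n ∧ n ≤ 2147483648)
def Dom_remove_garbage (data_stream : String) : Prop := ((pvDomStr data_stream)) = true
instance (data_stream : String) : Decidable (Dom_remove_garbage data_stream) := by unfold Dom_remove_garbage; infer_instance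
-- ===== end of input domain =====

-- B replaces A's flag + consecutive-bang counter with a helper that skips one whole
-- garbage block (consuming '!'-escaped pairs) and a main scan that collects kept chars.

-- ===== PORT A =====
-- one iteration of A's for-loop: state = (in_garbage, bang_count, output_stream as chars)
def remove_garbage_step (s : Bool × Int × List Char) (char : Char) : Bool × Int × List Char :=
  if s.1 = false then
    if char ≠ '<' then (s.1, s.2.1, s.2.2 ++ [char]) else (true, s.2.1, s.2.2)
  else
    if char = '!' then (s.1, s.2.1 + 1, s.2.2)
    -- bang_count % 2: bang_count is always ≥ 0 here, so Lean's Int.emod agrees with Python's %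
    else if s.2.1 % 2 = 0 ∧ char = '>' then (false, 0, s.2.2)
    else (s.1, 0, s.2.2)

def remove_garbage (data_stream : String) : String :=
  String.ofList (data_stream.toList.foldl remove_garbage_step (false, 0, [])).2.2

-- ===== PORT B =====
-- B's index loops walk the string left to right; ported as recursion on the remaining suffix.
-- _skip_garbage: '!' consumes two characters (i += 2 ↔ rest.tail), '>' ends the block, else one.
def skipGarbage : List Char → List Char
  | [] => []
  | c :: rest =>
    if c = '!' then skipGarbage rest.tail
    else if c = '>' then rest
    else skipGarbage rest
termination_by l => l.length
decreasing_by
  · simp [List.length_tail]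
  · simp

theorem skipGarbage_length_le : ∀ l : List Char, (skipGarbage l).length ≤ l.length := by
  intro l
  induction l using skipGarbage.induct <;> simp_all [skipGarbage, List.length_tail] <;> omega

-- main loop: '<' jumps past the garbage block, anything else is kept
def stripChars : List Char → List Char
  | [] => []
  | c :: rest =>
    if c = '<' then stripChars (skipGarbage rest)
    else c :: stripChars rest
termination_by l => l.length
decreasing_by
  · exact Nat.lt_succ_of_le (skipGarbage_length_le rest)
  · simp

def remove_garbage_alt (data_stream : String) : String :=
  String.ofList (stripChars data_stream.toList)

-- ===== PRECONDITION & SPEC =====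
def Spec_remove_garbage (data_stream : String) (out : String) : Prop := out = remove_garbage_alt data_stream
instance (data_stream : String) (out : String) : Decidable (Spec_remove_garbage data_stream out) := by unfold Spec_remove_garbage; infer_instance

-- ===== CLAIM (what is proved, stated in full; the proofs are below) =====
def Claim_equal_remove_garbage : Prop := ∀ (data_stream : String), Dom_remove_garbage data_stream → Spec_remove_garbage data_stream (remove_garbage data_stream)

-- ===== LEMMAS AND PROOFS =====

-- The joint loop invariant: starting A's fold outside garbage appends exactly stripChars l;
-- starting it inside garbage with an even bang count appends stripChars (skipGarbage l)
-- (A's bang count is even at every position B's skip helper visits, since '!' pairs off).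
theorem remove_garbage_key : ∀ (n : Nat) (l : List Char), l.length ≤ n →
    (∀ out : List Char,
      (l.foldl remove_garbage_step (false, 0, out)).2.2 = out ++ stripChars l) ∧
    (∀ (b : Int) (out : List Char), b % 2 = 0 →
      (l.foldl remove_garbage_step (true, b, out)).2.2 = out ++ stripChars (skipGarbage l)) := by
  intro n
  induction n with
  | zero =>
    intro l hl
    have : l = [] := List.eq_nil_of_length_eq_zero (Nat.le_zero.mp hl)
    subst this
    simp [stripChars, skipGarbage]
  | succ n ih =>
    intro l hl
    have hrest : ∀ (c : Char) (rest : List Char), l = c :: rest → rest.length ≤ n := by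
      intro c rest h; subst h; simpa using Nat.lt_succ_iff.mp (Nat.lt_of_lt_of_le (by simp) hl)
    constructor
    · intro out
      match l with
      | [] => simp [stripChars]
      | c :: rest =>
        have hr := hrest c rest rfl
        by_cases hc : c = '<'
        · subst hc
          have := (ih rest hr).2 0 out (by decide)
          simpa [remove_garbage_step, stripChars] using this
        · have := (ih rest hr).1 (out ++ [c])
          simp only [List.foldl_cons, remove_garbage_step, hc, ne_eq,
            not_false_iff, if_pos trivial]
          rw [this, stripChars, if_neg hc, List.append_assoc, List.singleton_append]
    · intro b out hb
      match l with
      | [] => simp [stripChars, skipGarbage]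
      | c :: rest =>
        have hr := hrest c rest rfl
        by_cases hbang : c = '!'
        · subst hbang
          match rest with
          | [] =>
            simp [remove_garbage_step, skipGarbage, stripChars]
          | d :: rest' =>
            have hr' : rest'.length ≤ n := by
              have := hrest '!' (d :: rest') rfl; simp at this; omega
            by_cases hd : d = '!'
            · subst hd
              have := (ih rest' hr').2 (b + 1 + 1) out (by omega)
              simpa [remove_garbage_step, skipGarbage] using this
            · have hodd : ¬ ((b + 1) % 2 = 0) := by omega
              have := (ih rest' hr').2 0 out (by decide)
              simpa [remove_garbage_step, skipGarbage, hd, hodd] using this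
        · by_cases hgt : c = '>'
          · subst hgt
            have := (ih rest hr).1 out
            simpa [remove_garbage_step, skipGarbage, hb] using this
          · have := (ih rest hr).2 0 out (by decide)
            simpa [remove_garbage_step, skipGarbage, hbang, hgt] using this

-- ===== VERDICT (by name: the statement is the Claim_ definition above) =====
theorem remove_garbage_spec : Claim_equal_remove_garbage := by
  intro s _
  unfold Spec_remove_garbage remove_garbage remove_garbage_alt
  rw [(remove_garbage_key s.toList.length s.toList le_rfl).1 []]
  rfl
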